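-- pv_equiv track=rewrite | github.com/mark1ry/adventofcode_2023 | day_2/cube_game.py | FindMinimumCubes
-- ===== SOURCE A (Python) =====
-- def FindMinimumCubes(games: list) -> list:
--     minimumCubes = []
--     for game in games:
--         minRed = 0
--         minBlue = 0
--         minGreen = 0
--         for set in game:
--             minRed = set[0] if set[0]>minRed else minRed
--             minBlue = set[1] if set[1]>minBlue else minBlue
--             minGreen = set[2] if set[2]>minGreen else minGreen
--         minimumCubes.append([minRed, minBlue, minGreen])
--     return minimumCubes
-- ===== SOURCE B (Python) =====
-- def FindMinimumCubes(games: list) -> list: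
--     return [[sorted([0] + [s[i] for s in game])[-1] for i in range(3)]
--             for game in games]
-- ===== Notes on version B (the rewrite author's own statement) =====
-- stated objective: alternative
-- what changed: A's single interleaved pass with three running accumulators is replaced by a sort-then-pick scheme: each colour column (with a 0 prepended) is sorted and its last element taken as the maximum.
import Mathlib
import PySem

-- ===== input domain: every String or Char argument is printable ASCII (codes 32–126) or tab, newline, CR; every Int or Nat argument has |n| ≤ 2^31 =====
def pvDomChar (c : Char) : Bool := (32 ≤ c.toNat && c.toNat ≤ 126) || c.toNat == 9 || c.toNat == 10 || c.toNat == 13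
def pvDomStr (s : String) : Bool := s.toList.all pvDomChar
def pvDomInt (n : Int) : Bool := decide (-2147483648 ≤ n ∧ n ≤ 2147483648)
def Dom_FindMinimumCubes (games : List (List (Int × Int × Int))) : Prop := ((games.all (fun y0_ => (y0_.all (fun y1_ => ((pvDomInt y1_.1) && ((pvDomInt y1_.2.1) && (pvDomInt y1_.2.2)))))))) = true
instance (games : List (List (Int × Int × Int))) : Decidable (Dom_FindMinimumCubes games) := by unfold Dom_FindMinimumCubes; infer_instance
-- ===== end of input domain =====

-- B replaces A's interleaved running-accumulator pass by a sort-then-pick scheme: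
-- each colour column (with a 0 prepended) is sorted and its last element taken (alternative; O(n log n) vs O(n)).

-- ===== PORT A =====
def FindMinimumCubes (games : List (List (Int × Int × Int))) : List (List Int) :=
  games.foldl (fun minimumCubes game =>
    let st := game.foldl (fun (m : Int × Int × Int) s =>
      (if s.1 > m.1 then s.1 else m.1,
       if s.2.1 > m.2.1 then s.2.1 else m.2.1,
       if s.2.2 > m.2.2 then s.2.2 else m.2.2)) (0, 0, 0)
    minimumCubes ++ [[st.1, st.2.1, st.2.2]]) []

-- ===== PORT B =====
-- sorted([0] + col)[-1]; the list is nonempty (it contains 0), so the [-1] index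
-- never raises and `.getD 0` is exact (the `none` branch is unreachable).
def pvColLast (col : List Int) : Int :=
  (PySem.List.pyGet? (PySem.List.sorted ((0 : Int) :: col) (fun x => x) false) (-1)).getD 0

def FindMinimumCubes_alt (games : List (List (Int × Int × Int))) : List (List Int) :=
  games.map (fun game =>
    [pvColLast (game.map (fun s => s.1)),
     pvColLast (game.map (fun s => s.2.1)),
     pvColLast (game.map (fun s => s.2.2))])

-- ===== PRECONDITION & SPEC =====
def Spec_FindMinimumCubes (games : List (List (Int × Int × Int))) (out : List (List Int)) : Prop := out = FindMinimumCubes_alt games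
instance (games : List (List (Int × Int × Int))) (out : List (List Int)) : Decidable (Spec_FindMinimumCubes games out) := by unfold Spec_FindMinimumCubes; infer_instance

-- ===== CLAIM =====
def Claim_equal_FindMinimumCubes : Prop := ∀ (games : List (List (Int × Int × Int))), Dom_FindMinimumCubes games → Spec_FindMinimumCubes games (FindMinimumCubes games)

-- ===== LEMMAS AND PROOFS =====

-- foldl max is the maximum of acc :: xs.
theorem pv_foldl_max_mem (xs : List Int) (a : Int) :
    xs.foldl max a ∈ a :: xs ∧ ∀ x ∈ a :: xs, x ≤ xs.foldl max a := by
  induction xs generalizing a with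
  | nil => simp
  | cons y t ih =>
      obtain ⟨hm, hb⟩ := ih (max a y)
      simp only [List.foldl]
      refine ⟨?_, ?_⟩
      · rcases List.mem_cons.mp hm with h | h
        · rw [h]
          rcases max_choice a y with h' | h' <;> rw [h'] <;> simp
        · simp [h]
      · intro x hx
        simp only [List.mem_cons] at hx
        rcases hx with h | h | h
        · exact ((le_of_eq h).trans (le_max_left a y)).trans (hb _ (by simp))
        · exact ((le_of_eq h).trans (le_max_right a y)).trans (hb _ (by simp))
        · exact hb _ (by simp [h])

-- In a ≤-pairwise list the last element bounds every element.
theorem pv_getLast?_ge (l : List Int) (hp : l.Pairwise (· ≤ ·)) (m : Int)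
    (hm : l.getLast? = some m) : ∀ x ∈ l, x ≤ m := by
  induction l with
  | nil => simp at hm
  | cons y t ih =>
      intro x hx
      cases t with
      | nil =>
          simp at hm hx
          omega
      | cons z u =>
          simp only [List.getLast?_cons_cons] at hm
          rcases List.mem_cons.mp hx with h | h
          · subst h
            have hmem : m ∈ z :: u :=
              List.mem_of_getLast? hm
            exact le_trans ((List.pairwise_cons.mp hp).1 _ hmem)
              (le_refl m)
          · exact ih (List.pairwise_cons.mp hp).2 hm x h

-- sorted-then-last equals foldl max.
theorem pv_colLast_eq (col : List Int) : pvColLast col = col.foldl max 0 := by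
  unfold pvColLast
  set l := PySem.List.sorted ((0 : Int) :: col) (fun x => x) false with hl
  have hperm : l.Perm ((0 : Int) :: col) := PySem.List.sorted_perm _ _ _
  have hpair : l.Pairwise (· ≤ ·) := by
    simpa using PySem.List.sorted_pairwise ((0 : Int) :: col) (fun x => x)
  have hne : l ≠ [] := by
    intro h
    have := hperm.length_eq
    simp [h] at this
  obtain ⟨m, hm⟩ := List.getLast?_isSome.mpr hne |> Option.isSome_iff_exists.mp
  rw [PySem.List.pyGet?_neg_one, hm]
  obtain ⟨hmem, hbound⟩ := pv_foldl_max_mem col 0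
  have hmmem : m ∈ (0 : Int) :: col := hperm.mem_iff.mp (List.mem_of_getLast? hm)
  have h1 : m ≤ col.foldl max 0 := hbound _ hmmem
  have h2 : col.foldl max 0 ≤ m :=
    pv_getLast?_ge l hpair m hm _ (hperm.mem_iff.mpr hmem)
  simpa using le_antisymm h1 h2

-- A's interleaved accumulator fold over one game equals three column max-folds.
theorem pv_game_fold (game : List (Int × Int × Int)) (r b g : Int) :
    game.foldl (fun (m : Int × Int × Int) s =>
      (if s.1 > m.1 then s.1 else m.1,
       if s.2.1 > m.2.1 then s.2.1 else m.2.1,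
       if s.2.2 > m.2.2 then s.2.2 else m.2.2)) (r, b, g)
    = ((game.map (fun s => s.1)).foldl max r,
       (game.map (fun s => s.2.1)).foldl max b,
       (game.map (fun s => s.2.2)).foldl max g) := by
  induction game generalizing r b g with
  | nil => rfl
  | cons s t ih =>
      simp only [List.foldl, List.map]
      rw [ih]
      have h1 : (if s.1 > r then s.1 else r) = max r s.1 := by omega
      have h2 : (if s.2.1 > b then s.2.1 else b) = max b s.2.1 := by omega
      have h3 : (if s.2.2 > g then s.2.2 else g) = max g s.2.2 := by omega
      rw [h1, h2, h3]

-- Appending singletons in a foldl builds the map.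
theorem pv_foldl_append {α β : Type} (f : α → β) (xs : List α) (acc : List β) :
    xs.foldl (fun a x => a ++ [f x]) acc = acc ++ xs.map f := by
  induction xs generalizing acc with
  | nil => simp
  | cons x t ih => simp [List.foldl, ih]

-- ===== VERDICT =====
theorem FindMinimumCubes_spec : Claim_equal_FindMinimumCubes := by
  intro games _
  show FindMinimumCubes games = FindMinimumCubes_alt games
  unfold FindMinimumCubes FindMinimumCubes_alt
  simp only [pv_game_fold, pv_colLast_eq]
  exact pv_foldl_append _ games []
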